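-- pv_equiv track=rewrite | github.com/KimJinSuAI/CodingTestPractice | 프로그래머스/Level3/110 옮기기(스택,문자열순서).py | found110
-- ===== SOURCE A (Python) =====
-- def found110(number):#110삭제
--     count = 0
--     stck = []
--     for chr in number:
--         if chr=="0" and len(stck)>1:
--             if stck[-1]=="1" and stck[-2]=="1":
--                 count+=1
--                 stck.pop()
--                 stck.pop()
--             else: stck.append(chr)
--         else:
--             stck.append(chr)
--     return ''.join(stck), count
-- ===== SOURCE B (Python) =====
-- def found110(number):
--     result = list(number)
--     count = 0
--     while True:
--         removed = False
--         for i in range(len(result) - 2):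
--             if result[i] == "1" and result[i + 1] == "1" and result[i + 2] == "0":
--                 del result[i:i + 3]
--                 count += 1
--                 removed = True
--                 break
--         if not removed:
--             break
--     return ''.join(result), count
-- ===== Notes on version B (the rewrite author's own statement) =====
-- stated objective: alternative
-- what changed: The single left-to-right stack pass is replaced by a brute-force fixpoint loop that repeatedly rescans from the start, deletes the leftmost occurrence of the three-character target pattern and counts it, until no occurrence remains.
import Mathlib
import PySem

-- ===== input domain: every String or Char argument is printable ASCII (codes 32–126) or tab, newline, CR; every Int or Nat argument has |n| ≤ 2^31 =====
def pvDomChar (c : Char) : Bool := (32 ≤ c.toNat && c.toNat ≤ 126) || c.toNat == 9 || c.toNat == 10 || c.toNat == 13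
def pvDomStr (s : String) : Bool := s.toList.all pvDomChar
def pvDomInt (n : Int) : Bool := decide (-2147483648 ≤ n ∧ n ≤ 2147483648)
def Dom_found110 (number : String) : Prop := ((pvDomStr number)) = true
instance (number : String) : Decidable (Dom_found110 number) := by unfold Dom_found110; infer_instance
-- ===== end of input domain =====

-- B replaces A's single stack pass by a repeated leftmost-'110'-deletion rescan loop (alternative decomposition, not faster).


-- ===== PORT A =====
-- the stack is represented head-first: push = cons, stck[-1] = head, stck[-2] = second; ''.join reverses back
def found110Step (st : List Char × Int) (c : Char) : List Char × Int :=
  if c = '0' ∧ st.1.length > 1 then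
    match st.1 with
    | a :: b :: rest => if a = '1' ∧ b = '1' then (rest, st.2 + 1) else (c :: st.1, st.2)
    | _ => (c :: st.1, st.2)
  else (c :: st.1, st.2)

def found110 (number : String) : String × Int :=
  let r := number.toList.foldl found110Step ([], 0)
  (String.mk r.1.reverse, r.2)

-- ===== PORT B =====
-- one inner scan of Source B: find the leftmost i with result[i..i+2] = "110" and delete it (none = no match)
def remove110? : List Char → Option (List Char)
  | [] => none
  | a :: t =>
      if a = '1' ∧ t.take 2 = ['1', '0'] then some (t.drop 2)
      else (remove110? t).map (a :: ·)

theorem remove110?_length : ∀ (l l' : List Char), remove110? l = some l' → l'.length + 3 = l.length := by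
  intro l
  induction l with
  | nil => intro l' h; simp [remove110?] at h
  | cons a t ih =>
    intro l' h
    simp only [remove110?] at h
    split at h
    · rename_i hc
      obtain ⟨_, ht⟩ := hc
      have : t = '1' :: '0' :: t.drop 2 := by
        conv_lhs => rw [← List.take_append_drop 2 t]
        rw [ht]; rfl
      simp at h
      subst h
      rw [this]; simp
    · rcases Option.map_eq_some_iff.mp h with ⟨t', ht', rfl⟩
      have := ih t' ht'
      simp; omega

-- Source B's outer while-loop: repeat until no '110' remains
def found110Loop (result : List Char) (count : Int) : List Char × Int :=
  match h : remove110? result with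
  | some r' => found110Loop r' (count + 1)
  | none => (result, count)
termination_by result.length
decreasing_by
  have := remove110?_length result r' h
  omega

def found110_alt (number : String) : String × Int :=
  let r := found110Loop number.toList 0
  (String.mk r.1, r.2)

-- ===== PRECONDITION & SPEC =====
def Spec_found110 (number : String) (out : String × Int) : Prop := out = found110_alt number
instance (number : String) (out : String × Int) : Decidable (Spec_found110 number out) := by unfold Spec_found110; infer_instance

-- ===== CLAIM (what is proved, stated in full; the proofs are below) =====
def Claim_equal_found110 : Prop := ∀ (number : String), Dom_found110 number → Spec_found110 number (found110 number)

-- ===== LEMMAS AND PROOFS =====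

-- the count accumulator is a pure offset in A's step
theorem step_count (st : List Char) (n : Int) (c : Char) :
    found110Step (st, n) c = ((found110Step (st, 0) c).1, n + (found110Step (st, 0) c).2) := by
  unfold found110Step
  split
  · rcases st with _ | ⟨a, _ | ⟨b, rest⟩⟩ <;> simp_all
    split <;> simp
  · simp

theorem foldl_count (l : List Char) : ∀ (st : List Char) (n : Int),
    List.foldl found110Step (st, n) l =
      ((List.foldl found110Step (st, 0) l).1, n + (List.foldl found110Step (st, 0) l).2) := by
  induction l with
  | nil => simp
  | cons c t ih =>
    intro st n
    simp only [List.foldl_cons]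
    rw [step_count st n c]
    rcases hs : found110Step (st, 0) c with ⟨s1, c1⟩
    rw [ih s1 (n + c1), ih s1 c1]
    simp; omega

-- any list containing '110' is reduced by remove110?
theorem occ_some : ∀ (u v : List Char), ∃ w, remove110? (u ++ '1' :: '1' :: '0' :: v) = some w := by
  intro u v
  induction u with
  | nil => exact ⟨v, by simp [remove110?]⟩
  | cons a t ih =>
    obtain ⟨w, hw⟩ := ih
    simp only [List.cons_append, remove110?]
    split
    · exact ⟨_, rfl⟩
    · exact ⟨a :: w, by rw [hw]; rfl⟩

-- if the whole remaining input (prefix already on the stack, reversed) has no '110', A just pushes everything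
theorem noOcc_run : ∀ (l p : List Char), remove110? (p.reverse ++ l) = none →
    List.foldl found110Step (p, 0) l = (l.reverse ++ p, 0) := by
  intro l
  induction l with
  | nil => intro p _; simp
  | cons c t ih =>
    intro p h
    have hstep : found110Step (p, 0) c = (c :: p, 0) := by
      rcases p with _ | ⟨a, _ | ⟨b, rest⟩⟩
      · simp [found110Step]
      · simp [found110Step]
      · by_cases hc : c = '0'
        · subst hc
          by_cases hab : a = '1' ∧ b = '1'
          · exfalso
            obtain ⟨ha, hb⟩ := hab
            subst ha; subst hb
            obtain ⟨w, hw⟩ := occ_some rest.reverse t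
            rw [show (('1' :: '1' :: rest : List Char).reverse ++ '0' :: t)
                  = rest.reverse ++ '1' :: '1' :: '0' :: t by simp] at h
            rw [hw] at h; simp at h
          · simp [found110Step, hab]
        · simp [found110Step, hc]
    simp only [List.foldl_cons, hstep]
    have h' : remove110? ((c :: p).reverse ++ t) = none := by
      simpa using h
    rw [ih (c :: p) h']
    simp

-- a successful remove110? splits the list around the deleted '110'
theorem some_split : ∀ (l l' : List Char), remove110? l = some l' →
    ∃ u v, l = u ++ '1' :: '1' :: '0' :: v ∧ l' = u ++ v := by
  intro l
  induction l with
  | nil => intro l' h; simp [remove110?] at h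
  | cons a t ih =>
    intro l' h
    simp only [remove110?] at h
    split at h
    · rename_i hc
      obtain ⟨ha, ht⟩ := hc
      have htd : t = '1' :: '0' :: t.drop 2 := by
        conv_lhs => rw [← List.take_append_drop 2 t]
        rw [ht]; rfl
      simp at h
      subst ha h
      exact ⟨[], t.drop 2, by rw [htd]; simp, by simp⟩
    · rcases Option.map_eq_some_iff.mp h with ⟨t', ht', rfl⟩
      obtain ⟨u, v, hteq, ht'eq⟩ := ih t' ht'
      exact ⟨a :: u, v, by simp [hteq], by simp [ht'eq]⟩

-- deleting one '110' from the input leaves A's final stack unchanged and its count one smaller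
theorem A_key (u v : List Char) (st : List Char) :
    List.foldl found110Step (st, 0) (u ++ '1' :: '1' :: '0' :: v) =
      ((List.foldl found110Step (st, 0) (u ++ v)).1,
        (List.foldl found110Step (st, 0) (u ++ v)).2 + 1) := by
  rcases hu : List.foldl found110Step (st, 0) u with ⟨s1, c1⟩
  have h110 : List.foldl found110Step (s1, c1) ['1', '1', '0'] = (s1, c1 + 1) := by
    simp only [List.foldl_cons, List.foldl_nil]
    have h1 : found110Step (s1, c1) '1' = ('1' :: s1, c1) := by
      unfold found110Step; simp
    rw [h1]
    have h2 : found110Step (('1' : Char) :: s1, c1) '1' = ('1' :: '1' :: s1, c1) := by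
      unfold found110Step; simp
    rw [h2]
    unfold found110Step; simp
  have lhs : List.foldl found110Step (st, 0) (u ++ '1' :: '1' :: '0' :: v)
      = List.foldl found110Step (s1, c1 + 1) v := by
    rw [show (u ++ '1' :: '1' :: '0' :: v) = (u ++ ['1', '1', '0']) ++ v by simp,
      List.foldl_append, List.foldl_append, hu, h110]
  have rhs : List.foldl found110Step (st, 0) (u ++ v)
      = List.foldl found110Step (s1, c1) v := by
    rw [List.foldl_append, hu]
  rw [lhs, rhs, foldl_count v s1 (c1 + 1), foldl_count v s1 c1]
  simp; omega

-- unfolding equations for B's loop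
theorem found110Loop_none {l : List Char} (h : remove110? l = none) (n : Int) :
    found110Loop l n = (l, n) := by
  rw [found110Loop]
  split
  · rename_i r' h'; rw [h'] at h; simp at h
  · rfl

theorem found110Loop_some {l l' : List Char} (h : remove110? l = some l') (n : Int) :
    found110Loop l n = found110Loop l' (n + 1) := by
  rw [found110Loop]
  split
  · rename_i r' h'; rw [h'] at h; injection h with h; rw [h]
  · rename_i h'; rw [h'] at h; simp at h

-- the count accumulator is a pure offset in B's loop
theorem loop_count (l : List Char) : ∀ (n : Int),
    found110Loop l n = ((found110Loop l 0).1, n + (found110Loop l 0).2) := by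
  induction hl : l.length using Nat.strong_induction_on generalizing l with
  | _ k ih =>
    intro n
    rcases h : remove110? l with _ | l'
    · rw [found110Loop_none h, found110Loop_none h]; simp
    · have hlen := remove110?_length l l' h
      have hrec := ih l'.length (by omega) l' rfl
      rw [found110Loop_some h n, found110Loop_some h 0,
        hrec (n + 1), hrec (0 + 1)]
      simp; omega

-- main equivalence: A's fold computes B's loop (stack reversed)
theorem main_eq : ∀ (l : List Char),
    List.foldl found110Step (([] : List Char), (0 : Int)) l
      = ((found110Loop l 0).1.reverse, (found110Loop l 0).2) := by
  intro l
  induction hl : l.length using Nat.strong_induction_on generalizing l with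
  | _ k ih =>
    rcases h : remove110? l with _ | l'
    · rw [found110Loop_none h]
      have := noOcc_run l [] (by simpa using h)
      simpa using this
    · have hlen := remove110?_length l l' h
      obtain ⟨u, v, hleq, hl'eq⟩ := some_split l l' h
      have hkey := A_key u v ([] : List Char)
      rw [← hleq, ← hl'eq] at hkey
      have hih := ih l'.length (by omega) l' rfl
      rw [found110Loop_some h 0, loop_count l' (0 + 1), hkey, hih]
      simp; omega

-- ===== VERDICT (by name: the statement is the Claim_ definition above) =====
theorem found110_spec : Claim_equal_found110 := by
  intro number _
  unfold Spec_found110 found110 found110_alt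
  rw [main_eq number.toList]
  simp
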